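-- pv_equiv track=rewrite | github.com/AndreiPiterbarg/compact_sidon | tests/verify_part4.py | compute_autoconv_symmetry
-- ===== SOURCE A (Python) =====
-- def compute_autoconv_symmetry(child):
--     """Autoconvolution using symmetry optimization (matches kernel)."""
--     d = len(child)
--     conv_len = 2 * d - 1
--     raw = [0] * conv_len
--     for i in range(d):
--         ci = int(child[i])
--         raw[2 * i] += ci * ci
--         for j in range(i + 1, d):
--             raw[i + j] += 2 * ci * int(child[j])
--     return raw
-- ===== SOURCE B (Python) =====
-- def compute_autoconv_symmetry(child):
--     """Autoconvolution computed coefficient-by-coefficient (output-indexed)."""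
--     d = len(child)
--     c = [int(x) for x in child]
--     return [
--         sum(c[i] * c[k - i] for i in range(max(0, k - d + 1), min(k, d - 1) + 1))
--         for k in range(2 * d - 1)
--     ]
-- ===== Notes on version B (the rewrite author's own statement) =====
-- stated objective: alternative
-- what changed: A fills a mutable buffer input-indexed with a diagonal/off-diagonal symmetry trick; B computes each autoconvolution coefficient directly as a closed-form sum over the valid index window, building the result output-indexed with no mutation.
import Mathlib
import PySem

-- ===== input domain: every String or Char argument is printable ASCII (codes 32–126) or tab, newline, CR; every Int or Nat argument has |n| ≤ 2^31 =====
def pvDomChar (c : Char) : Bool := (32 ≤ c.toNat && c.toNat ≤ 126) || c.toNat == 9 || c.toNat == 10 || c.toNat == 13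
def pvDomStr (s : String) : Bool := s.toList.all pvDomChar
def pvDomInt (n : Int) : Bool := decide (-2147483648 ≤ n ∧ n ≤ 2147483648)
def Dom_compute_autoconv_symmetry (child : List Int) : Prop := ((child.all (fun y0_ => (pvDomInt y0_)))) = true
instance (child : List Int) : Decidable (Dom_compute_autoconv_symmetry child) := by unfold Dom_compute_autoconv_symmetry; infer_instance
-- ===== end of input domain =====

-- B replaces A's mutating symmetry-trick accumulation by a direct output-indexed
-- closed-form sum for each coefficient (objective: alternative, same O(d^2) cost).

-- ===== PORT A =====
-- literal transliteration of A: raw = [0]*(2d-1); for i in range(d): raw[2i]+=ci*ci;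
-- for j in range(i+1,d): raw[i+j]+=2*ci*child[j]   (Nat '2*d-1' = 0 when d=0, like [0]*(-1)=[])
def compute_autoconv_symmetry (child : List Int) : List Int :=
  let d := child.length
  let convLen := 2 * d - 1
  let raw := List.replicate convLen (0 : Int)
  (List.range d).foldl
    (fun raw i =>
      let ci := child.getD i 0
      let raw := raw.set (2 * i) (raw.getD (2 * i) 0 + ci * ci)
      (List.range' (i + 1) (d - (i + 1))).foldl
        (fun raw j => raw.set (i + j) (raw.getD (i + j) 0 + 2 * ci * child.getD j 0)) raw)
    raw

-- ===== PORT B =====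
-- literal transliteration of Source B: for each k in range(2d-1), sum c[i]*c[k-i]
-- over i in range(max(0, k-d+1), min(k, d-1)+1); Nat 'k+1-d' = max(0, k-d+1)
def compute_autoconv_symmetry_alt (child : List Int) : List Int :=
  let d := child.length
  (List.range (2 * d - 1)).map (fun k =>
    ((List.range' (k + 1 - d) (min k (d - 1) + 1 - (k + 1 - d))).map
      (fun i => child.getD i 0 * child.getD (k - i) 0)).sum)

-- ===== PRECONDITION & SPEC =====
def Spec_compute_autoconv_symmetry (child : List Int) (out : List Int) : Prop := out = compute_autoconv_symmetry_alt child
instance (child : List Int) (out : List Int) : Decidable (Spec_compute_autoconv_symmetry child out) := by unfold Spec_compute_autoconv_symmetry; infer_instance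

-- ===== CLAIM (what is proved, stated in full; the proofs are below) =====
def Claim_equal_compute_autoconv_symmetry : Prop := ∀ (child : List Int), Dom_compute_autoconv_symmetry child → Spec_compute_autoconv_symmetry child (compute_autoconv_symmetry child)

-- ===== LEMMAS AND PROOFS =====

-- c i = child[i]; pvS child k = Σ_{i<d} Σ_{j<d} [i+j=k] c i * c j, the canonical autoconvolution coefficient
def pvC (child : List Int) (i : Nat) : Int := child.getD i 0

def pvS (child : List Int) (k : Nat) : Int :=
  ∑ i ∈ Finset.range child.length, ∑ j ∈ Finset.range child.length,
    if i + j = k then pvC child i * pvC child j else 0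

-- A's loop body as an abstract list of (index, increment) updates
def pvBumps (U : List (Nat × Int)) (r : List Int) : List Int :=
  U.foldl (fun r p => r.set p.1 (r.getD p.1 0 + p.2)) r

def pvU (child : List Int) : List (Nat × Int) :=
  (List.range child.length).flatMap (fun i =>
    (2 * i, pvC child i * pvC child i) ::
      (List.range' (i + 1) (child.length - (i + 1))).map
        (fun j => (i + j, 2 * pvC child i * pvC child j)))

theorem pvFoldlFlatMap {α β γ : Type} (l : List α) (g : α → List β) (f : γ → β → γ) (init : γ) :
    (l.flatMap g).foldl f init = l.foldl (fun acc x => (g x).foldl f acc) init := by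
  induction l generalizing init with
  | nil => rfl
  | cons a t ih => simp [List.foldl_append, ih]

theorem pvA_eq_bumps (child : List Int) :
    compute_autoconv_symmetry child
      = pvBumps (pvU child) (List.replicate (2 * child.length - 1) 0) := by
  unfold compute_autoconv_symmetry pvBumps pvU pvC
  rw [pvFoldlFlatMap]
  simp only [List.foldl_cons, List.foldl_map]

theorem pvGetD_set (l : List Int) (i : Nat) (a : Int) (k : Nat) :
    (l.set i a).getD k 0 = if i = k ∧ i < l.length then a else l.getD k 0 := by
  simp only [List.getD_eq_getElem?_getD, List.getElem?_set]
  split_ifs <;> simp_all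
  omega

theorem pvBumps_length (U : List (Nat × Int)) (r : List Int) :
    (pvBumps U r).length = r.length := by
  induction U generalizing r with
  | nil => rfl
  | cons p t ih => simp [pvBumps, List.foldl_cons] at ih ⊢; rw [ih]; simp

theorem pvBumps_getD (U : List (Nat × Int)) (r : List Int)
    (h : ∀ p ∈ U, p.1 < r.length) (k : Nat) :
    (pvBumps U r).getD k 0
      = r.getD k 0 + ((U.filter (fun p => p.1 == k)).map Prod.snd).sum := by
  induction U generalizing r with
  | nil => simp [pvBumps]
  | cons p t ih =>
    have hp : p.1 < r.length := h p (by simp)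
    have ht : ∀ q ∈ t, q.1 < (r.set p.1 (r.getD p.1 0 + p.2)).length := by
      intro q hq; simpa using h q (by simp [hq])
    simp only [pvBumps, List.foldl_cons] at ih ⊢
    rw [ih _ ht, pvGetD_set, List.filter_cons]
    by_cases hk : p.1 = k
    · subst hk; simp [hp]; ring
    · simp [hk]

-- every update index of A lands strictly below 2d-1
theorem pvU_lt (child : List Int) :
    ∀ p ∈ pvU child, p.1 < 2 * child.length - 1 := by
  intro p hp
  simp only [pvU, List.mem_flatMap, List.mem_range] at hp
  obtain ⟨i, hi, hmem⟩ := hp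
  rcases List.mem_cons.mp hmem with h | h
  · subst h; simp; omega
  · obtain ⟨j, hj, rfl⟩ := List.mem_map.mp h
    rw [List.mem_range'] at hj
    simp; omega

theorem pvFilterMapSum (U : List (Nat × Int)) (k : Nat) :
    ((U.filter (fun p => p.1 == k)).map Prod.snd).sum
      = (U.map (fun p => if p.1 = k then p.2 else 0)).sum := by
  induction U with
  | nil => rfl
  | cons p t ih =>
    rw [List.filter_cons]
    by_cases hk : p.1 = k <;> simp [hk, ih]

theorem pvSumFlatMap {α β : Type} (l : List α) (g : α → List β) (f : β → Int) :
    ((l.flatMap g).map f).sum = (l.map (fun x => ((g x).map f).sum)).sum := by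
  induction l with
  | nil => rfl
  | cons a t ih => simp [ih]

theorem pvRangeSum (f : Nat → Int) (n : Nat) :
    ((List.range n).map f).sum = ∑ i ∈ Finset.range n, f i := rfl

theorem pvRange'Sum (f : Nat → Int) (a n : Nat) :
    ((List.range' a n).map f).sum = ∑ i ∈ Finset.Ico a (a + n), f i := by
  rw [List.range'_eq_map_range, List.map_map, Finset.sum_Ico_eq_sum_range,
    Nat.add_sub_cancel_left]
  exact pvRangeSum (fun x => f (a + x)) n

theorem pvTriangleGen (d : Nat) (f : Nat → Nat → Int) (hsymm : ∀ i j, f i j = f j i) :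
    ∑ i ∈ Finset.range d, (f i i + ∑ j ∈ Finset.Ico (i+1) d, (f i j + f i j))
      = ∑ i ∈ Finset.range d, ∑ j ∈ Finset.range d, f i j := by
  have hsplit : ∀ i ∈ Finset.range d,
      ∑ j ∈ Finset.range d, f i j
        = (∑ j ∈ Finset.range i, f i j) + f i i + ∑ j ∈ Finset.Ico (i+1) d, f i j := by
    intro i hi
    rw [Finset.mem_range] at hi
    rw [Finset.range_eq_Ico,
      ← Finset.sum_Ico_consecutive _ (Nat.zero_le (i+1)) (by omega : i+1 ≤ d),
      ← Finset.range_eq_Ico, Finset.sum_range_succ]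
  rw [Finset.sum_congr rfl hsplit]
  have hswap : ∑ i ∈ Finset.range d, ∑ j ∈ Finset.Ico (i+1) d, f i j
      = ∑ i ∈ Finset.range d, ∑ j ∈ Finset.range i, f i j := by
    have h := Finset.sum_Ico_Ico_comm' 0 d f
    rw [← Finset.range_eq_Ico] at h
    rw [h]
    refine Finset.sum_congr rfl (fun i _ => ?_)
    rw [Finset.range_eq_Ico]
    exact Finset.sum_congr rfl (fun j _ => hsymm j i)
  simp only [Finset.sum_add_distrib, hswap]
  ring

-- A's entry k equals the canonical coefficient
theorem pvA_getD (child : List Int) (k : Nat) :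
    (compute_autoconv_symmetry child).getD k 0 = pvS child k := by
  rw [pvA_eq_bumps, pvBumps_getD _ _ (by simpa using pvU_lt child) k]
  have hz : (List.replicate (2 * child.length - 1) (0 : Int)).getD k 0 = 0 := by
    simp only [List.getD_eq_getElem?_getD, List.getElem?_replicate]
    split <;> rfl
  rw [hz, zero_add, pvFilterMapSum]
  unfold pvU
  rw [pvSumFlatMap, pvRangeSum]
  have hcongr : ∀ i ∈ Finset.range child.length,
      ((((2 * i, pvC child i * pvC child i) ::
          (List.range' (i + 1) (child.length - (i + 1))).map
            (fun j => (i + j, 2 * pvC child i * pvC child j))).map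
        (fun p => if p.1 = k then p.2 else 0)).sum)
      = (fun i => (if i + i = k then pvC child i * pvC child i else 0)
          + ∑ j ∈ Finset.Ico (i + 1) child.length,
              ((if i + j = k then pvC child i * pvC child j else 0)
                + (if i + j = k then pvC child i * pvC child j else 0))) i := by
    intro i hi
    rw [Finset.mem_range] at hi
    simp only [List.map_cons, List.sum_cons, List.map_map, Function.comp_def]
    rw [pvRange'Sum, Nat.add_sub_cancel' (by omega : i + 1 ≤ child.length)]
    congr 1
    · rw [two_mul]
    · refine Finset.sum_congr rfl (fun j _ => ?_)
      split_ifs <;> ring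
  rw [Finset.sum_congr rfl hcongr]
  exact pvTriangleGen child.length
    (fun i j => if i + j = k then pvC child i * pvC child j else 0)
    (fun i j => by beta_reduce; rw [Nat.add_comm i j, mul_comm (pvC child i)]) ▸ rfl

-- B's summand sum equals the canonical coefficient, for k in range
theorem pvB_entry (child : List Int) (k : Nat) (hk : k < 2 * child.length - 1) :
    ((List.range' (k + 1 - child.length)
        (min k (child.length - 1) + 1 - (k + 1 - child.length))).map
      (fun i => child.getD i 0 * child.getD (k - i) 0)).sum = pvS child k := by
  have hd : 1 ≤ child.length := by by_contra h; omega
  rw [pvRange'Sum]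
  rw [show (k + 1 - child.length)
        + (min k (child.length - 1) + 1 - (k + 1 - child.length))
      = min k (child.length - 1) + 1 from by omega]
  have hset : Finset.Ico (k + 1 - child.length) (min k (child.length - 1) + 1)
      = (Finset.range child.length).filter (fun i => i ≤ k ∧ k - i < child.length) := by
    ext i
    simp only [Finset.mem_Ico, Finset.mem_filter, Finset.mem_range]
    omega
  rw [hset, Finset.sum_filter]
  unfold pvS pvC
  refine Finset.sum_congr rfl (fun i hi => ?_)
  rw [Finset.mem_range] at hi
  by_cases h : i ≤ k ∧ k - i < child.length
  · rw [if_pos h]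
    symm
    rw [Finset.sum_eq_single_of_mem (k - i) (Finset.mem_range.mpr (by omega))
        (fun b _ hbne => by rw [if_neg (by omega)])]
    rw [if_pos (by omega)]
  · rw [if_neg h]
    symm
    apply Finset.sum_eq_zero
    intro j hj
    rw [Finset.mem_range] at hj
    rw [if_neg (by omega)]

theorem pvA_length (child : List Int) :
    (compute_autoconv_symmetry child).length = 2 * child.length - 1 := by
  rw [pvA_eq_bumps, pvBumps_length, List.length_replicate]

-- ===== VERDICT (by name: the statement is the Claim_ definition above) =====
theorem compute_autoconv_symmetry_spec : Claim_equal_compute_autoconv_symmetry := by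
  intro child _
  unfold Spec_compute_autoconv_symmetry compute_autoconv_symmetry_alt
  apply List.ext_getElem
  · simp [pvA_length]
  · intro k hk1 hk2
    simp only [List.getElem_map, List.getElem_range]
    rw [← List.getD_eq_getElem _ 0, pvA_getD]
    rw [pvB_entry]
    simpa [pvA_length] using hk1
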